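-- pv_equiv track=rewrite | github.com/MathiasOoi/Homework | Wikipedia/newTable.py | getGender
-- ===== SOURCE A (Python) =====
-- def getGender(page):
--     male, mc = ["he", "him", "his"], 0
--     female, fc = ["her", "she", "hers"], 0
--
--     for word in page.split():
--         if word in male:
--             mc += 1
--         elif word in female:
--             fc += 1
--
--     return "male" if mc > fc else "female"
-- ===== SOURCE B (Python) =====
-- def getGender(page):
--     c = {}
--     for w in page.split():
--         c[w] = c.get(w, 0) + 1
--     mc = c.get("he", 0) + c.get("him", 0) + c.get("his", 0)
--     fc = c.get("her", 0) + c.get("she", 0) + c.get("hers", 0)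
--     return "male" if mc > fc else "female"
-- ===== Notes on version B (the rewrite author's own statement) =====
-- stated objective: alternative
-- what changed: Replaces the per-word if/elif membership scan with a one-pass word-frequency table (a dict built once), from which the male and female totals are read off by six constant-time lookups; same strict > tie rule.
import Mathlib
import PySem

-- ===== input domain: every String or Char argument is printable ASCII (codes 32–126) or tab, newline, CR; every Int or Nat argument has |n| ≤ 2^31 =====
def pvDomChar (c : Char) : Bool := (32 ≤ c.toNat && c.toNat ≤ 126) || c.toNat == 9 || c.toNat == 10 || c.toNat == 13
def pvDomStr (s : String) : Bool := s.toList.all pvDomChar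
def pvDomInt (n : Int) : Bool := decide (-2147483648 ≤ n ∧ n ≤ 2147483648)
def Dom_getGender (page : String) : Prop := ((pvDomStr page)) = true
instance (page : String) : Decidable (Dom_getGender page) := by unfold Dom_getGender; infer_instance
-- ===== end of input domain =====

-- B replaces A's per-word if/elif scan by a word-frequency dict built in one pass,
-- read off with six lookups (objective: alternative decomposition, same cost).

-- ===== PORT A =====
def getGender (page : String) : String :=
  let male : List String := ["he", "him", "his"]
  let female : List String := ["her", "she", "hers"]
  let counts : Int × Int :=
    (PySem.Str.split₀ page).foldl
      (fun acc word =>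
        if word ∈ male then (acc.1 + 1, acc.2)
        else if word ∈ female then (acc.1, acc.2 + 1)
        else acc)
      (0, 0)
  if counts.1 > counts.2 then "male" else "female"

-- ===== PORT B =====
def getGender_alt (page : String) : String :=
  let c : PySem.Dict String Int :=
    (PySem.Str.split₀ page).foldl
      (fun d w => d.insert w (d.getD w 0 + 1)) PySem.Dict.empty
  let mc : Int := c.getD "he" 0 + c.getD "him" 0 + c.getD "his" 0
  let fc : Int := c.getD "her" 0 + c.getD "she" 0 + c.getD "hers" 0
  if mc > fc then "male" else "female"

-- ===== PRECONDITION & SPEC =====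
def Spec_getGender (page : String) (out : String) : Prop := out = getGender_alt page
instance (page : String) (out : String) : Decidable (Spec_getGender page out) := by unfold Spec_getGender; infer_instance

-- ===== CLAIM (what is proved, stated in full; the proofs are below) =====
def Claim_equal_getGender : Prop := ∀ (page : String), Dom_getGender page → Spec_getGender page (getGender page)

-- ===== LEMMAS AND PROOFS =====

-- A's branching loop computes the pronoun counts as word-counts of the six words.
theorem getGender_loop_eq (ws : List String) (mc fc : Int) :
    ws.foldl
      (fun acc word =>
        if word ∈ (["he", "him", "his"] : List String) then (acc.1 + 1, acc.2)
        else if word ∈ (["her", "she", "hers"] : List String) then (acc.1, acc.2 + 1)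
        else acc)
      (mc, fc)
    = (mc + ws.count "he" + ws.count "him" + ws.count "his",
       fc + ws.count "her" + ws.count "she" + ws.count "hers") := by
  induction ws generalizing mc fc with
  | nil => simp
  | cons w ws ih =>
    simp only [List.foldl_cons, List.count_cons]
    by_cases h1 : w ∈ (["he", "him", "his"] : List String)
    · simp only [if_pos h1]
      rw [ih]
      fin_cases h1 <;> simp <;> ring
    · by_cases h2 : w ∈ (["her", "she", "hers"] : List String)
      · simp only [if_neg h1, if_pos h2]
        rw [ih]
        have h1' := h1
        simp only [List.mem_cons, not_or] at h1'
        obtain ⟨a1, a2, a3⟩ := h1'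
        fin_cases h2 <;> simp_all <;> ring
      · simp only [if_neg h1, if_neg h2]
        rw [ih]
        simp only [List.mem_cons, not_or] at h1 h2
        obtain ⟨a1, a2, a3⟩ := h1
        obtain ⟨b1, b2, b3⟩ := h2
        simp [beq_iff_eq, a1, a2, a3, b1, b2, b3, Ne.symm]

-- ===== VERDICT (by name: the statement is the Claim_ definition above) =====
theorem getGender_spec : Claim_equal_getGender := by
  intro page _
  unfold Spec_getGender getGender getGender_alt
  simp only [getGender_loop_eq, PySem.Dict.getD_foldl_insert_add_one,
    PySem.Dict.getD_empty, zero_add]
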